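-- pv_equiv track=rewrite | github.com/exchris/Pythonlearn | leetcode/code/detectCapital.py | detectCapitalUseThird
-- ===== SOURCE A (Python) =====
-- def detectCapitalUseThird(word):
--     """
--     :param word:str
--     :return:bool
--     """
--     n = len(word)
--     if n == 1:return True
--     if word[0] < 'a':
--         if n == 2:return True
--         if word[1] < 'a':
--             for i in range(2, n):
--                 if word[i] >= 'a':
--                     return False
--         else:
--             for i in range(2, n):
--                 if word[i] < 'a':
--                     return False
--     else:
--         for i in range(1, n):
--             if word[i] < 'a':
--                 return False
--     return True
-- ===== SOURCE B (Python) =====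
-- def detectCapitalUseThird(word):
--     first_upper = word[0] < 'a'
--     rest = word[1:]
--     return all(c >= 'a' for c in rest) or (first_upper and all(c < 'a' for c in rest))
-- ===== Notes on version B (the rewrite author's own statement) =====
-- stated objective: simpler
-- what changed: Replaces the three-way nested branch with four hand-written early-return loops by a single boolean disjunction over two aggregate all() passes on word[1:].
-- outside the precondition, e.g. on detectCapitalUseThird(''): A raises IndexError, B raises IndexError
import Mathlib
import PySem

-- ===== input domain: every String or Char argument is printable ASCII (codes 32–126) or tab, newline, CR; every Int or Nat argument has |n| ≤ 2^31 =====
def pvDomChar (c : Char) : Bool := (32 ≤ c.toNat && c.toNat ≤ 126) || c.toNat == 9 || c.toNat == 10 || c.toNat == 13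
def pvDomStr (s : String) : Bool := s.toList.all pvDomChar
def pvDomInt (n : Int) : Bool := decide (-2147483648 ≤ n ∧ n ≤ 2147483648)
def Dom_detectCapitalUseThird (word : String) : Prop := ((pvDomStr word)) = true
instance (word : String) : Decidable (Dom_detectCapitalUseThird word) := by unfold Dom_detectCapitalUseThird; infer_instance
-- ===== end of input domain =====

-- B replaces A's nested three-way branching with four early-return loops by one boolean
-- disjunction over two aggregate passes on word[1:] (objective: simpler).


-- ===== PORT A =====
-- 'for i in range(k, n): if word[i] >= 'a': return False … return True' over the suffix word[k:]
def pvALoopRestUpper : List Char → Bool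
  | [] => true
  | c :: rest => if c ≥ 'a' then false else pvALoopRestUpper rest

-- 'for i in range(k, n): if word[i] < 'a': return False … return True' over the suffix word[k:]
def pvALoopRestLower : List Char → Bool
  | [] => true
  | c :: rest => if c < 'a' then false else pvALoopRestLower rest

def detectCapitalUseThird (word : String) : Bool :=
  let cs := word.toList
  let n := cs.length
  if n = 1 then true
  else
    match cs with
    | [] => true  -- Python raises IndexError on word[0] here; excluded by Pre_
    | c0 :: rest =>
      if c0 < 'a' then
        if n = 2 then true
        else
          match rest with
          | [] => true  -- unreachable (n ≥ 2 here)
          | c1 :: rest2 =>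
            if c1 < 'a' then pvALoopRestUpper rest2
            else pvALoopRestLower rest2
      else pvALoopRestLower rest

-- ===== PORT B =====
def detectCapitalUseThird_alt (word : String) : Bool :=
  match word.toList with
  | [] => false  -- Python raises IndexError on word[0] here; excluded by Pre_
  | c0 :: rest =>
    rest.all (fun c => c ≥ 'a') || (decide (c0 < 'a') && rest.all (fun c => c < 'a'))

-- ===== PRECONDITION & SPEC =====
-- Pre_ excludes only the empty string, on which both A and B raise IndexError at word[0].
def Pre_detectCapitalUseThird (word : String) : Prop := word ≠ ""
instance (word : String) : Decidable (Pre_detectCapitalUseThird word) := by unfold Pre_detectCapitalUseThird; infer_instance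
def pvWitness_detectCapitalUseThird : String := "Hi"

def Spec_detectCapitalUseThird (word : String) (out : Bool) : Prop := out = detectCapitalUseThird_alt word
instance (word : String) (out : Bool) : Decidable (Spec_detectCapitalUseThird word out) := by unfold Spec_detectCapitalUseThird; infer_instance

-- ===== CLAIM (what is proved, stated in full; the proofs are below) =====
def Claim_equal_detectCapitalUseThird : Prop := ∀ (word : String), Dom_detectCapitalUseThird word → Pre_detectCapitalUseThird word → Spec_detectCapitalUseThird word (detectCapitalUseThird word)

-- ===== LEMMAS AND PROOFS =====
theorem pvALoopRestUpper_eq (l : List Char) : pvALoopRestUpper l = l.all (fun c => c < 'a') := by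
  induction l with
  | nil => rfl
  | cons c rest ih =>
    simp only [pvALoopRestUpper, List.all_cons, ih]
    by_cases h : c ≥ 'a'
    · simp [h, not_lt.mpr h]
    · simp [h, lt_of_not_ge h]

theorem pvALoopRestLower_eq (l : List Char) : pvALoopRestLower l = l.all (fun c => c ≥ 'a') := by
  induction l with
  | nil => rfl
  | cons c rest ih =>
    simp only [pvALoopRestLower, List.all_cons, ih]
    by_cases h : c < 'a'
    · simp [h, not_le.mpr h]
    · simp [h, le_of_not_gt h]

-- ===== VERDICT (by name: the statement is the Claim_ definition above) =====
theorem detectCapitalUseThird_spec : Claim_equal_detectCapitalUseThird := by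
  intro word _ hpre
  unfold Spec_detectCapitalUseThird detectCapitalUseThird detectCapitalUseThird_alt
  have hne : word.toList ≠ [] := fun h => hpre (String.toList_eq_nil_iff.mp h)
  match hcs : word.toList with
  | [] => exact absurd hcs hne
  | c0 :: rest =>
    simp only [hcs]
    match rest with
    | [] =>
      simp [List.all_nil]
    | c1 :: rest2 =>
      simp only [List.length_cons]
      by_cases h0 : c0 < 'a'
      · by_cases hn : rest2 = []
        · subst hn
          simp only [h0]
          by_cases h1 : c1 < 'a'
          · simp [h1, not_lt.mpr]
          · simp [h1, le_of_not_gt h1]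
        · have : rest2.length + 1 + 1 ≠ 1 := by omega
          have h2 : rest2.length + 1 + 1 ≠ 2 := by
            have := List.length_pos_iff.mpr hn
            omega
          simp only [if_neg this, h0, if_pos rfl, if_neg h2]
          by_cases h1 : c1 < 'a'
          · simp [h1, pvALoopRestUpper_eq, not_le.mpr h1, h0]
          · simp [h1, pvALoopRestLower_eq, le_of_not_gt h1, not_lt.mpr (le_of_not_gt h1), h0]
      · simp [h0, pvALoopRestLower_eq]
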